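-- pv_equiv track=rewrite | github.com/Tom-Moule/Fleximals | fleximal_object.py | __is_number_valid
-- ===== SOURCE A (Python) =====
-- def __is_number_valid(number):
--
--   if type(number) != int:
--     raise TypeError("This programme is designed to work with whole numbers in a specified base")
--   elif number < 0:
--     raise ValueError("This programme is desinged to work with positive whole numbers in a specified base")
--   else:
--     digits = [int(x) for x in list(str(number))]
--     return number, digits
-- ===== SOURCE B (Python) =====
-- def __is_number_valid(number):
--
--   if type(number) != int:
--     raise TypeError("This programme is designed to work with whole numbers in a specified base")
--   elif number < 0:
--     raise ValueError("This programme is desinged to work with positive whole numbers in a specified base")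
--   elif number == 0:
--     return number, [0]
--   else:
--     digits = []
--     n = number
--     while n > 0:
--       digits.append(n % 10)
--       n //= 10
--     digits.reverse()
--     return number, digits
-- ===== Notes on version B (the rewrite author's own statement) =====
-- stated objective: alternative
-- what changed: digits are computed arithmetically (repeated %10 and //10, collected least-significant-first and reversed, with 0 special-cased) instead of converting the number to a string and mapping int over its characters
import Mathlib
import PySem

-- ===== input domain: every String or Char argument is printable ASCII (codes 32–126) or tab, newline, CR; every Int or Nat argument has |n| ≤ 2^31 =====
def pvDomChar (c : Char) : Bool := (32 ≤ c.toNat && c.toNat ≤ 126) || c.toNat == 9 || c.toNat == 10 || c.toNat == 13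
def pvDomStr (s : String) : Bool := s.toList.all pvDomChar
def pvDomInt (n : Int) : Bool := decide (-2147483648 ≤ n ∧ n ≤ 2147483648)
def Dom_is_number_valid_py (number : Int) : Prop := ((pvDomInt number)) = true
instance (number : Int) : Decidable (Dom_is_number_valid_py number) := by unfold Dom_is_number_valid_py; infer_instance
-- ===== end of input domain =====

-- B computes the digit list arithmetically (%10 / //10 loop, reversed) instead of mapping int over str(number); same validation, same result.


-- ===== PORT A =====
-- int(x) for a single character x of str(number); exact on Pre_ (every such character is a digit there)
def is_number_valid_py (number : Int) : Int × List Int :=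
  if number < 0 then (number, [])  -- Python raises ValueError here; excluded by Pre_
  else (number, (PySem.Int.toStr number).toList.map (fun c => (PySem.Int.ofChars? [c]).getD 0))

-- ===== PORT B =====
-- while n > 0: digits.append(n % 10); n //= 10
def pvAltLoop (n : Int) (digits : List Int) : List Int :=
  if _h : 0 < n then pvAltLoop (PySem.Int.floordiv n 10) (digits ++ [PySem.Int.mod n 10]) else digits
termination_by n.toNat
decreasing_by
  simp only [PySem.Int.floordiv, Int.fdiv_eq_ediv]
  omega

def is_number_valid_py_alt (number : Int) : Int × List Int :=
  if number < 0 then (number, [])  -- Python raises ValueError here; excluded by Pre_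
  else if number = 0 then (number, [0])
  else (number, (pvAltLoop number []).reverse)

-- ===== PRECONDITION & SPEC =====
-- A raises ValueError on negative numbers (TypeError is unreachable for an int argument)
def Pre_is_number_valid_py (number : Int) : Prop := 0 ≤ number
instance (number : Int) : Decidable (Pre_is_number_valid_py number) := by unfold Pre_is_number_valid_py; infer_instance
def pvWitness_is_number_valid_py : Int := (12345)

def Spec_is_number_valid_py (number : Int) (out : Int × List Int) : Prop := out = is_number_valid_py_alt number
instance (number : Int) (out : Int × List Int) : Decidable (Spec_is_number_valid_py number out) := by unfold Spec_is_number_valid_py; infer_instance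

-- ===== CLAIM (what is proved, stated in full; the proofs are below) =====
def Claim_equal_is_number_valid_py : Prop := ∀ (number : Int), Dom_is_number_valid_py number → Pre_is_number_valid_py number → Spec_is_number_valid_py number (is_number_valid_py number)

-- ===== LEMMAS AND PROOFS =====

-- the common intermediate: most-significant-first digit list of a natural number
def pvNatDigits (m : Nat) : List Int :=
  if m < 10 then [(m : Int)] else pvNatDigits (m / 10) ++ [((m % 10 : Nat) : Int)]
termination_by m
decreasing_by exact Nat.div_lt_self (by omega) (by norm_num)

def pvF (c : Char) : Int := (PySem.Int.ofChars? [c]).getD 0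

theorem pvF_digitChar (d : Nat) (hd : d < 10) : pvF (Nat.digitChar d) = (d : Int) := by
  interval_cases d <;> decide

theorem toDigitsCore_map (fuel : Nat) : ∀ (m : Nat) (acc : List Char), m < fuel →
    (Nat.toDigitsCore 10 fuel m acc).map pvF = pvNatDigits m ++ acc.map pvF := by
  induction fuel with
  | zero => intro m acc h; omega
  | succ fuel ih =>
    intro m acc h
    rw [Nat.toDigitsCore]
    by_cases h10 : m / 10 = 0
    · have hm : m < 10 := by omega
      simp [h10, pvNatDigits, hm, pvF_digitChar m hm, Nat.mod_eq_of_lt hm]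
    · have hm : ¬ m < 10 := by omega
      rw [if_neg h10]
      rw [ih (m / 10) _ (by omega)]
      conv_rhs => rw [pvNatDigits]
      rw [if_neg hm]
      simp [pvF_digitChar (m % 10) (Nat.mod_lt m (by norm_num))]

theorem A_digits (m : Nat) : (Nat.toDigits 10 m).map pvF = pvNatDigits m := by
  have := toDigitsCore_map (m + 1) m [] (by omega)
  simpa [Nat.toDigits] using this

theorem pvAltLoop_nonpos (n : Int) (acc : List Int) (h : ¬ 0 < n) : pvAltLoop n acc = acc := by
  rw [pvAltLoop]; simp [dif_neg h]

theorem pvAltLoop_acc (k : Nat) : ∀ (n : Int), n.toNat ≤ k → ∀ acc, pvAltLoop n acc = acc ++ pvAltLoop n [] := by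
  induction k with
  | zero =>
    intro n hk acc
    have h : ¬ 0 < n := by omega
    rw [pvAltLoop_nonpos n acc h, pvAltLoop_nonpos n [] h]
    simp
  | succ k ih =>
    intro n hk acc
    by_cases h : 0 < n
    · have hlt : (PySem.Int.floordiv n 10).toNat ≤ k := by
        simp only [PySem.Int.floordiv, Int.fdiv_eq_ediv]
        omega
      conv_lhs => rw [pvAltLoop]
      conv_rhs => rw [pvAltLoop]
      simp only [dif_pos h]
      rw [ih _ hlt (acc ++ [PySem.Int.mod n 10]), ih _ hlt ([] ++ [PySem.Int.mod n 10])]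
      simp
    · rw [pvAltLoop_nonpos n acc h, pvAltLoop_nonpos n [] h]
      simp

theorem B_digits_aux (k : Nat) : ∀ (n : Int), n.toNat ≤ k → 0 < n →
    (pvAltLoop n []).reverse = pvNatDigits n.toNat := by
  induction k with
  | zero => intro n hk hn; omega
  | succ k ih =>
    intro n hk hn
    have hdiv : PySem.Int.floordiv n 10 = ((n.toNat / 10 : Nat) : Int) := by
      simp only [PySem.Int.floordiv, Int.fdiv_eq_ediv]
      omega
    have hmod : PySem.Int.mod n 10 = ((n.toNat % 10 : Nat) : Int) := by
      simp only [PySem.Int.mod, Int.fmod_eq_emod]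
      omega
    rw [pvAltLoop]
    simp only [dif_pos hn]
    rw [pvAltLoop_acc ((PySem.Int.floordiv n 10).toNat) _ (le_refl _)]
    by_cases h10 : n < 10
    · have hd0 : PySem.Int.floordiv n 10 = 0 := by rw [hdiv]; omega
      rw [hd0, pvAltLoop]
      simp only [show ¬ (0:Int) < 0 by omega, dif_neg, not_false_eq_true]
      rw [pvNatDigits]
      have hlt : n.toNat < 10 := by omega
      rw [if_pos hlt]
      simp
      omega

    · have hdpos : 0 < PySem.Int.floordiv n 10 := by rw [hdiv]; omega
      have hk' : (PySem.Int.floordiv n 10).toNat ≤ k := by rw [hdiv]; omega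
      rw [List.reverse_append, ih _ hk' hdpos]
      conv_rhs => rw [pvNatDigits]
      have hge : ¬ n.toNat < 10 := by omega
      rw [if_neg hge, hdiv, hmod]
      simp only [Int.toNat_natCast]
      simp

theorem B_digits (n : Int) (hn : 0 < n) : (pvAltLoop n []).reverse = pvNatDigits n.toNat :=
  B_digits_aux n.toNat n (le_refl _) hn

-- ===== VERDICT (by name: the statement is the Claim_ definition above) =====
theorem is_number_valid_py_spec : Claim_equal_is_number_valid_py := by
  intro number _ hpre
  have hpre' : (0:Int) ≤ number := hpre
  unfold Spec_is_number_valid_py is_number_valid_py is_number_valid_py_alt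
  have hneg : ¬ number < 0 := by omega
  simp only [if_neg hneg]
  by_cases h0 : number = 0
  · subst h0
    decide
  · simp only [if_neg h0]
    have h1 : (PySem.Int.toStr number).toList = Nat.toDigits 10 number.toNat := by
      rw [PySem.Int.toList_toStr]
      simp [PySem.Int.toChars, if_neg hneg]
    rw [h1]
    have : (Nat.toDigits 10 number.toNat).map (fun c => (PySem.Int.ofChars? [c]).getD 0)
        = (Nat.toDigits 10 number.toNat).map pvF := rfl
    rw [this, A_digits, ← B_digits number (by omega)]
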